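-- pv_equiv track=rewrite | github.com/xmaciejson/university | UWr/WDPP 2024/pracownia 4.py | okres_binarny
-- ===== SOURCE A (Python) =====
-- def okres_binarny(a, b):
--     # Rozłożenie b na czynniki i usunięcie potęg 2
--     tmp_b = b
--     while tmp_b % 2 == 0:
--         tmp_b //= 2
--
--     # Jeśli po usunięciu potęg 2 tmp_b == 1, ułamek ma skończoną reprezentację
--     if tmp_b == 1:
--         return 0, ""  # Okres równy 0, brak części okresowej
--
--     # Algorytm dla wyznaczania długości okresu i samego okresu binarnego
--     reszta = a % b
--     reszty = []
--     okres_binarny = ""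
--
--     # Mnożenie reszty przez 2 symuluje przesunięcie binarnego przecinka
--     while reszta not in reszty:
--         reszty.append(reszta)
--         reszta *= 2
--         bit = reszta // b  # Wyciągamy bit (0 lub 1)
--         okres_binarny += str(bit)  # Dodajemy bit do reprezentacji okresu
--         reszta %= b  # Aktualizujemy resztę po wyciągnięciu bitu
--
--     # Znajdujemy pozycję pierwszego wystąpienia okresu i długość cyklu
--     pierwsza_pozycja = reszty.index(reszta)
--     okres = len(reszty) - pierwsza_pozycja
--     okres_binarny = okres_binarny[pierwsza_pozycja:]  # Wyciągamy binarny okres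
--
--     return okres, okres_binarny
-- ===== SOURCE B (Python) =====
-- def okres_binarny(a, b):
--     # Strip factors of 2 from b; a power of two means a finite expansion.
--     tmp_b = b
--     while tmp_b % 2 == 0:
--         tmp_b //= 2
--     if tmp_b == 1:
--         return 0, ""
--
--     r0 = a % b
--     # Floyd's tortoise-hare on r -> (2*r) % b : find a meeting point inside the cycle.
--     t = (2 * r0) % b
--     h = (4 * r0) % b
--     while t != h:
--         t = (2 * t) % b
--         h = (4 * h) % b
--     # Phase 2: find the start of the cycle (first repeated remainder).
--     x = r0
--     while x != h:
--         x = (2 * x) % b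
--         h = (2 * h) % b
--     # Phase 3: measure the cycle length from its start.
--     lam = 1
--     z = (2 * x) % b
--     while z != x:
--         z = (2 * z) % b
--         lam += 1
--     # Replay lam division steps from the cycle start, emitting the period bits.
--     digits = []
--     r = x
--     for _ in range(lam):
--         r *= 2
--         digits.append(str(r // b))
--         r %= b
--     return lam, "".join(digits)
-- ===== Notes on version B (the rewrite author's own statement) =====
-- stated objective: faster
-- what changed: Replaces A's grow-a-list loop (membership scan of all previous remainders at every emitted bit) by Floyd's tortoise-hare cycle detection on r -> (2*r) % b in O(1) memory, then replays exactly one cycle to emit the period bits.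
import Mathlib
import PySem

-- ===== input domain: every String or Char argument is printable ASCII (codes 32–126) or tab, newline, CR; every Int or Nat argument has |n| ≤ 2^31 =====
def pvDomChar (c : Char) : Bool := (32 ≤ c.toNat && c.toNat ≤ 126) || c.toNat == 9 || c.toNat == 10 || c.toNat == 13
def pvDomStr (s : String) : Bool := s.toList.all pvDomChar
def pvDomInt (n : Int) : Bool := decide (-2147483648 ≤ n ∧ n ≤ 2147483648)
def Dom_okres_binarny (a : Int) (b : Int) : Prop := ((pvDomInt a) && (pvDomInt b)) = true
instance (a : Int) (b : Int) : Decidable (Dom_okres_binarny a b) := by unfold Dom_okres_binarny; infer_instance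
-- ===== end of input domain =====

-- B replaces A's grow-a-list loop (linear membership scan per emitted bit) by Floyd's
-- tortoise–hare cycle detection on r ↦ (2*r) % b, then replays one cycle to emit the bits.

-- ===== PORT A =====
-- the 'while tmp_b % 2 == 0: tmp_b //= 2' prefix (identical in A and B); fuel-totalised
def pvStrip (fuel : Nat) (t : Int) : Int :=
  match fuel with
  | 0 => t
  | f + 1 => if PySem.Int.mod t 2 = 0 then pvStrip f (PySem.Int.floordiv t 2) else t

-- A's main loop: 'while reszta not in reszty: …'
def pvLoopA (b : Int) (fuel : Nat) (r : Int) (reszty : List Int) (s : String) :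
    Int × List Int × String :=
  match fuel with
  | 0 => (r, reszty, s)
  | f + 1 =>
    if r ∈ reszty then (r, reszty, s)
    else
      let r2 := r * 2
      let bit := PySem.Int.floordiv r2 b
      pvLoopA b f (PySem.Int.mod r2 b) (reszty ++ [r]) (s ++ PySem.Int.toStr bit)

def okres_binarny (a : Int) (b : Int) : Int × String :=
  let tmp := pvStrip (b.natAbs + 2) b
  if tmp = 1 then (0, "")
  else
    let res := pvLoopA b (b.natAbs + 1) (PySem.Int.mod a b) [] ""
    let p : Nat := (PySem.List.index? res.2.1 res.1).getD 0
    (PySem.List.len res.2.1 - (p : Int), PySem.Str.slice res.2.2 (some (p : Int)) none)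

-- ===== PORT B =====
-- Floyd phase 1: 'while t != h: t = (2*t)%b; h = (4*h)%b'; returns the meeting remainder
def pvMeet (b : Int) (fuel : Nat) (t h : Int) : Int :=
  match fuel with
  | 0 => h
  | f + 1 =>
    if t = h then h
    else pvMeet b f (PySem.Int.mod (2 * t) b) (PySem.Int.mod (4 * h) b)

-- Floyd phase 2: 'while x != h: x = (2*x)%b; h = (2*h)%b'; returns the cycle start
def pvStart (b : Int) (fuel : Nat) (x h : Int) : Int :=
  match fuel with
  | 0 => x
  | f + 1 =>
    if x = h then x
    else pvStart b f (PySem.Int.mod (2 * x) b) (PySem.Int.mod (2 * h) b)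

-- Floyd phase 3: 'while z != x: z = (2*z)%b; lam += 1'
def pvLam (b : Int) (fuel : Nat) (x z : Int) (lam : Int) : Int :=
  match fuel with
  | 0 => lam
  | f + 1 => if z = x then lam else pvLam b f x (PySem.Int.mod (2 * z) b) (lam + 1)

-- 'for _ in range(n): r *= 2; digits.append(str(r // b)); r %= b'
def pvDigits (b : Int) (n : Nat) (r : Int) : List String :=
  match n with
  | 0 => []
  | m + 1 =>
    PySem.Int.toStr (PySem.Int.floordiv (2 * r) b) :: pvDigits b m (PySem.Int.mod (2 * r) b)

def okres_binarny_alt (a : Int) (b : Int) : Int × String :=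
  let tmp := pvStrip (b.natAbs + 2) b
  if tmp = 1 then (0, "")
  else
    let r0 := PySem.Int.mod a b
    let h := pvMeet b (b.natAbs + 1) (PySem.Int.mod (2 * r0) b) (PySem.Int.mod (4 * r0) b)
    let x := pvStart b (b.natAbs + 1) r0 h
    let lam := pvLam b (b.natAbs + 1) x (PySem.Int.mod (2 * x) b) 1
    (lam, PySem.Str.join "" (pvDigits b lam.toNat x))

-- ===== PRECONDITION & SPEC =====
-- Pre_ excludes exactly b = 0, where A's first while-loop never terminates (no return).
def Pre_okres_binarny (a : Int) (b : Int) : Prop := b ≠ 0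
instance (a : Int) (b : Int) : Decidable (Pre_okres_binarny a b) := by
  unfold Pre_okres_binarny; infer_instance

def pvWitness_okres_binarny : Int × Int := (1, 3)

def Spec_okres_binarny (a : Int) (b : Int) (out : Int × String) : Prop := out = okres_binarny_alt a b
instance (a : Int) (b : Int) (out : Int × String) : Decidable (Spec_okres_binarny a b out) := by
  unfold Spec_okres_binarny; infer_instance

-- ===== CLAIM (what is proved, stated in full; the proofs are below) =====
def Claim_equal_okres_binarny : Prop := ∀ (a : Int) (b : Int), Dom_okres_binarny a b → Pre_okres_binarny a b → Spec_okres_binarny a b (okres_binarny a b)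


-- ===== LEMMAS AND PROOFS =====

-- the step map of both loops and its orbit
def pvF (b r : Int) : Int := PySem.Int.mod (2 * r) b

def pvSeq (b a : Int) (i : Nat) : Int := (pvF b)^[i] (PySem.Int.mod a b)

def pvBitStr (b a : Int) (i : Nat) : String :=
  PySem.Int.toStr (PySem.Int.floordiv (2 * pvSeq b a i) b)

def pvCs (b a : Int) (i : Nat) : Char :=
  if PySem.Int.floordiv (2 * pvSeq b a i) b = 0 then '0' else '1'

-- range of Python's mod: [0,b) for b>0, (b,0] for b<0
def pvInR (b r : Int) : Prop := if 0 < b then 0 ≤ r ∧ r < b else b < r ∧ r ≤ 0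

lemma pvInR_mod (b x : Int) (hb : b ≠ 0) : pvInR b (PySem.Int.mod x b) := by
  unfold pvInR
  split
  · next h => exact ⟨PySem.Int.mod_nonneg x h, PySem.Int.mod_lt x h⟩
  · next h =>
    have hneg : b < 0 := lt_of_le_of_ne (not_lt.mp h) hb
    exact PySem.Int.mod_neg_bounds x hneg

lemma pvSeq_succ (b a : Int) (i : Nat) :
    pvSeq b a (i + 1) = PySem.Int.mod (2 * pvSeq b a i) b := by
  unfold pvSeq
  rw [Function.iterate_succ_apply']
  rfl

lemma pvSeq_inR (b a : Int) (hb : b ≠ 0) (i : Nat) : pvInR b (pvSeq b a i) := by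
  induction i with
  | zero => exact pvInR_mod b a hb
  | succ n ih => rw [pvSeq_succ]; exact pvInR_mod b _ hb

lemma pvSeq_shift (b a : Int) (k i : Nat) : pvSeq b a (k + i) = (pvF b)^[k] (pvSeq b a i) := by
  unfold pvSeq
  rw [← Function.iterate_add_apply]

lemma pvSeq_congr_add (b a : Int) {i j : Nat} (h : pvSeq b a i = pvSeq b a j) (k : Nat) :
    pvSeq b a (i + k) = pvSeq b a (j + k) := by
  rw [Nat.add_comm i k, Nat.add_comm j k, pvSeq_shift, pvSeq_shift, h]

lemma pymod_neg (a b : Int) (hb : b < 0) : PySem.Int.mod a b = -PySem.Int.mod (-a) (-b) := by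
  have h := PySem.Int.mod_neg_neg (-a) (-b)
  rw [neg_neg, neg_neg] at h
  omega

lemma emod_mul2 (x m : Int) : 2 * (x % m) % m = 2 * x % m := by
  rw [Int.mul_emod 2 (x % m), Int.emod_emod_of_dvd _ dvd_rfl, ← Int.mul_emod]

lemma pvMod2 (b x : Int) (hb : b ≠ 0) :
    PySem.Int.mod (2 * PySem.Int.mod x b) b = PySem.Int.mod (2 * x) b := by
  rcases lt_or_gt_of_ne hb with hneg | hpos
  · rw [pymod_neg x b hneg, pymod_neg _ b hneg, pymod_neg (2*x) b hneg]
    have hp : (0:Int) < -b := by omega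
    rw [PySem.Int.mod_eq_emod_of_pos hp, PySem.Int.mod_eq_emod_of_pos hp,
        PySem.Int.mod_eq_emod_of_pos hp]
    have h1 : -(2 * -(-x % -b)) = 2 * (-x % -b) := by ring
    rw [h1, emod_mul2]
    ring_nf
  · rw [PySem.Int.mod_eq_emod_of_pos hpos, PySem.Int.mod_eq_emod_of_pos hpos,
        PySem.Int.mod_eq_emod_of_pos hpos, emod_mul2]

lemma pvMod4 (b x : Int) (hb : b ≠ 0) :
    PySem.Int.mod (4 * x) b = PySem.Int.mod (2 * PySem.Int.mod (2 * x) b) b := by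
  rw [pvMod2 b (2*x) hb]
  have : 2 * (2 * x) = 4 * x := by ring
  rw [this]

lemma pvSeq_two_succ (b a : Int) (hb : b ≠ 0) (i : Nat) :
    PySem.Int.mod (4 * pvSeq b a i) b = pvSeq b a (i + 2) := by
  rw [pvMod4 b _ hb, ← pvSeq_succ, ← pvSeq_succ]

lemma pvBit01 (b r : Int) (hb : b ≠ 0) (h : pvInR b r) :
    PySem.Int.floordiv (2 * r) b = 0 ∨ PySem.Int.floordiv (2 * r) b = 1 := by
  unfold pvInR at h
  rcases lt_or_gt_of_ne hb with hneg | hpos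
  · rw [if_neg (by omega)] at h
    have he : PySem.Int.floordiv (2*r) b = PySem.Int.floordiv (-(2*r)) (-b) := by
      rw [PySem.Int.floordiv_neg_neg]
    rw [he]
    have hp : (0:Int) < -b := by omega
    by_cases hlt : -(2*r) < -b
    · left; rw [PySem.Int.floordiv_eq_iff_of_pos hp]; constructor <;> omega
    · right; rw [PySem.Int.floordiv_eq_iff_of_pos hp]; constructor <;> omega
  · rw [if_pos hpos] at h
    by_cases hlt : 2*r < b
    · left; rw [PySem.Int.floordiv_eq_iff_of_pos hpos]; constructor <;> omega
    · right; rw [PySem.Int.floordiv_eq_iff_of_pos hpos]; constructor <;> omega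

lemma pvBitStr_toList (b a : Int) (hb : b ≠ 0) (i : Nat) :
    (pvBitStr b a i).toList = [pvCs b a i] := by
  unfold pvBitStr pvCs
  rcases pvBit01 b (pvSeq b a i) hb (pvSeq_inR b a hb i) with h | h <;> rw [h]
  · decide
  · decide

-- the core structure of the orbit: first repeat time N, cycle start μ, with
-- the full characterisation of equalities among orbit points
lemma pvCore (b a : Int) (hb : b ≠ 0) :
    ∃ N μ : Nat, μ < N ∧ N ≤ b.natAbs ∧
      (∀ i j : Nat, i < j → pvSeq b a i = pvSeq b a j → μ ≤ i ∧ (N - μ) ∣ (j - i)) ∧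
      (∀ i j : Nat, μ ≤ i → i ≤ j → (N - μ) ∣ (j - i) → pvSeq b a i = pvSeq b a j) := by
  set d := b.natAbs with hd
  have hdpos : 0 < d := Int.natAbs_pos.mpr hb
  -- pigeonhole: a repeat among pvSeq 0 .. pvSeq d
  have hpig : ∃ i j : Nat, i < j ∧ j ≤ d ∧ pvSeq b a i = pvSeq b a j := by
    classical
    set T : Finset Int := if 0 < b then Finset.Ico 0 b else Finset.Ioc b 0 with hT
    have hcard : T.card = d := by
      rw [hT]; split
      · next h => rw [Int.card_Ico]; simp [hd]; omega
      · next h => rw [Int.card_Ioc]; simp [hd]; omega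
    have hmaps : ∀ i ∈ Finset.range (d + 1), pvSeq b a i ∈ T := by
      intro i _
      have h := pvSeq_inR b a hb i
      unfold pvInR at h
      rw [hT]
      split <;> rename_i hs
      · rw [if_pos hs] at h; simp [Finset.mem_Ico]; exact h
      · rw [if_neg hs] at h; simp [Finset.mem_Ioc]; exact ⟨h.1, h.2⟩
    have hlt : T.card < (Finset.range (d + 1)).card := by
      rw [hcard, Finset.card_range]; omega
    obtain ⟨i, hi, j, hj, hne, heq⟩ :=
      Finset.exists_ne_map_eq_of_card_lt_of_maps_to hlt hmaps
    rcases Nat.lt_trichotomy i j with h | h | h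
    · exact ⟨i, j, h, by simpa using Nat.lt_succ_iff.mp (Finset.mem_range.mp hj), heq⟩
    · exact absurd h hne
    · exact ⟨j, i, h, by simpa using Nat.lt_succ_iff.mp (Finset.mem_range.mp hi), heq.symm⟩
  -- first repeat time N
  have hex : ∃ n : Nat, ∃ i, i < n ∧ pvSeq b a i = pvSeq b a n := by
    obtain ⟨i, j, hij, _, h⟩ := hpig
    exact ⟨j, i, hij, h⟩
  classical
  set N := Nat.find hex with hNdef
  obtain ⟨i0, hi0N, hi0⟩ := Nat.find_spec hex
  have hNmin : ∀ m, m < N → ¬∃ i, i < m ∧ pvSeq b a i = pvSeq b a m :=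
    fun m hm => Nat.find_min hex hm
  have hNd : N ≤ d := by
    obtain ⟨i, j, hij, hjd, h⟩ := hpig
    have : N ≤ j := Nat.find_min' hex ⟨i, hij, h⟩
    omega
  -- first partner μ
  have hμex : ∃ i : Nat, i < N ∧ pvSeq b a i = pvSeq b a N := ⟨i0, hi0N, hi0⟩
  set μ := Nat.find hμex with hμdef
  obtain ⟨hμN, hμeq⟩ := Nat.find_spec hμex
  have hμmin : ∀ i, i < μ → pvSeq b a i ≠ pvSeq b a N := by
    intro i hi
    have := Nat.find_min hμex hi
    intro h
    exact this ⟨by omega, h⟩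
  set lam := N - μ with hlam
  have hlampos : 0 < lam := by omega
  have hNsplit : N = μ + lam := by omega
  -- periodicity on the tail
  have per1 : ∀ j : Nat, pvSeq b a (μ + lam + j) = pvSeq b a (μ + j) := by
    intro j
    have := pvSeq_congr_add b a (i := N) (j := μ) hμeq.symm j
    rw [hNsplit] at this
    exact this
  have perK : ∀ k j : Nat, pvSeq b a (μ + j + k * lam) = pvSeq b a (μ + j) := by
    intro k
    induction k with
    | zero => intro j; simp
    | succ n ih =>
      intro j
      have h1 : μ + j + (n + 1) * lam = μ + lam + (j + n * lam) := by ring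
      rw [h1, per1 (j + n * lam)]
      have h2 : μ + (j + n * lam) = μ + j + n * lam := by ring
      rw [h2, ih j]
  have distinct : ∀ i j : Nat, i < j → j < N → pvSeq b a i ≠ pvSeq b a j := by
    intro i j hij hjN h
    exact hNmin j hjN ⟨i, hij, h⟩
  -- divisibility on the tail
  have L2a : ∀ i k : Nat, μ ≤ i → 0 < k → pvSeq b a (i + k) = pvSeq b a i → lam ∣ k := by
    intro i k hμi hk h
    have hmu : pvSeq b a (μ + k) = pvSeq b a μ := by
      have ht : μ + i * lam = i + (μ + i * lam - i) := by
        have : i ≤ μ + i * lam := by nlinarith [hlampos]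
        omega
      have h1 : pvSeq b a (i + (μ + i * lam - i) + k) = pvSeq b a (i + (μ + i * lam - i)) := by
        have := pvSeq_congr_add b a (i := i + k) (j := i) h (μ + i * lam - i)
        calc pvSeq b a (i + (μ + i * lam - i) + k) = pvSeq b a (i + k + (μ + i * lam - i)) := by ring_nf
          _ = pvSeq b a (i + (μ + i * lam - i)) := this
      rw [← ht] at h1
      have h2 : pvSeq b a (μ + i * lam) = pvSeq b a μ := by
        have := perK i 0
        simpa using this
      have h3 : pvSeq b a (μ + i * lam + k) = pvSeq b a (μ + k) := by
        have h4 : μ + i * lam + k = μ + k + i * lam := by ring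
        rw [h4]
        exact perK i k
      rw [h3, h2] at h1
      exact h1
    -- reduce k mod lam
    rcases Nat.eq_zero_or_pos (k % lam) with hs | hs
    · exact Nat.dvd_of_mod_eq_zero hs
    · exfalso
      have hk1 : k = k % lam + (k / lam) * lam := by
        rw [Nat.mod_add_div' k lam]
      have h5 : pvSeq b a (μ + k % lam) = pvSeq b a (μ + k) := by
        conv_rhs => rw [hk1]
        have h6 : μ + (k % lam + k / lam * lam) = μ + k % lam + (k / lam) * lam := by ring
        rw [h6, perK]
      rw [hmu] at h5
      have hlt : μ + k % lam < N := by
        have := Nat.mod_lt k hlampos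
        omega
      exact distinct μ (μ + k % lam) (by omega) hlt h5.symm
  refine ⟨N, μ, hμN, hNd, ?_, ?_⟩
  · intro i j hij h
    have hμi : μ ≤ i := by
      by_contra hlt
      push_neg at hlt
      rcases Nat.lt_or_ge j N with hjN | hjN
      · exact distinct i j hij hjN h
      · -- reduce j below N
        have hμj : μ ≤ j := by omega
        have hred : pvSeq b a j = pvSeq b a (μ + (j - μ) % lam) := by
          have h1 : j = μ + (j - μ) % lam + ((j - μ) / lam) * lam := by
            have := Nat.mod_add_div' (j - μ) lam
            omega
          conv_lhs => rw [h1]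
          rw [perK]
        have hlt2 : μ + (j - μ) % lam < N := by
          have := Nat.mod_lt (j - μ) hlampos
          omega
        have hij2 : i < μ + (j - μ) % lam := by omega
        exact distinct i (μ + (j - μ) % lam) hij2 hlt2 (h.trans hred)
    refine ⟨hμi, ?_⟩
    have := L2a i (j - i) hμi (by omega) ?_
    · exact this
    · have : i + (j - i) = j := by omega
      rw [this]; exact h.symm
  · intro i j hμi hij hdvd
    obtain ⟨m, hm⟩ := hdvd
    have hperk := perK m (i - μ)
    have e1 : μ + (i - μ) = i := by omega
    rw [e1] at hperk
    have e2 : i + m * lam = j := by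
      rw [mul_comm m lam, hlam]
      omega
    rw [e2] at hperk
    exact hperk.symm

-- A's loop characterisation
lemma pvLoopA_run (b a : Int) (N μ : Nat) (hμN : μ < N)
    (hP2 : ∀ i j : Nat, i < j → pvSeq b a i = pvSeq b a j → μ ≤ i ∧ (N - μ) ∣ (j - i))
    (hP3 : ∀ i j : Nat, μ ≤ i → i ≤ j → (N - μ) ∣ (j - i) → pvSeq b a i = pvSeq b a j) :
    ∀ fuel c, c ≤ N → N - c < fuel → ∀ s : String,
      pvLoopA b fuel (pvSeq b a c) ((List.range c).map (pvSeq b a)) s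
        = (pvSeq b a N, (List.range N).map (pvSeq b a),
           ((List.range' c (N - c)).map (pvBitStr b a)).foldl (· ++ ·) s) := by
  intro fuel
  induction fuel with
  | zero => intro c _ h; omega
  | succ f ih =>
    intro c hcN hfuel s
    by_cases hc : c = N
    · subst hc
      have hmem : pvSeq b a c ∈ (List.range c).map (pvSeq b a) :=
        List.mem_map.mpr ⟨μ, List.mem_range.mpr hμN, hP3 μ c le_rfl (by omega) ⟨1, by omega⟩⟩
      simp only [pvLoopA, if_pos hmem]
      simp
    · have hcN' : c < N := by omega
      have hmem : pvSeq b a c ∉ (List.range c).map (pvSeq b a) := by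
        intro hm
        obtain ⟨i, hi, hieq⟩ := List.mem_map.mp hm
        rw [List.mem_range] at hi
        obtain ⟨hμi, hdvd⟩ := hP2 i c hi hieq
        obtain ⟨m, hm'⟩ := hdvd
        rcases Nat.eq_zero_or_pos m with h0 | h0
        · rw [h0, Nat.mul_zero] at hm'
          omega
        · have : N - μ ≤ c - i := by
            calc N - μ = (N - μ) * 1 := by omega
              _ ≤ (N - μ) * m := Nat.mul_le_mul_left _ h0
              _ = c - i := hm'.symm
          omega
      simp only [pvLoopA, if_neg hmem]
      have e1 : PySem.Int.mod (pvSeq b a c * 2) b = pvSeq b a (c + 1) := by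
        rw [mul_comm, ← pvSeq_succ]
      have e2 : (List.range c).map (pvSeq b a) ++ [pvSeq b a c]
          = (List.range (c+1)).map (pvSeq b a) := by
        rw [List.range_succ, List.map_append, List.map_cons, List.map_nil]
      have e3 : PySem.Int.toStr (PySem.Int.floordiv (pvSeq b a c * 2) b) = pvBitStr b a c := by
        rw [mul_comm]; rfl
      rw [e1, e2, e3]
      rw [ih (c+1) (by omega) (by omega) (s ++ pvBitStr b a c)]
      have e4 : N - c = (N - (c+1)) + 1 := by omega
      rw [e4, List.range'_succ]
      simp

lemma pvIndex_eq (b a : Int) (N μ : Nat) (hμN : μ < N)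
    (hP2 : ∀ i j : Nat, i < j → pvSeq b a i = pvSeq b a j → μ ≤ i ∧ (N - μ) ∣ (j - i))
    (hμeq : pvSeq b a μ = pvSeq b a N) :
    PySem.List.index? ((List.range N).map (pvSeq b a)) (pvSeq b a N) = some μ := by
  rw [PySem.List.index?_eq_some_iff]
  refine ⟨(List.range μ).map (pvSeq b a), (List.range' (μ+1) (N-μ-1)).map (pvSeq b a), ?_, by simp, ?_⟩
  · have hsplit : List.range N = List.range μ ++ List.range' μ (N - μ) := by
      have e := List.range'_append (s := 0) (m := μ) (n := N - μ) (step := 1)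
      norm_num at e
      rw [List.range_eq_range', List.range_eq_range']
      rw [show μ + (N - μ) = N from by omega] at e
      exact e.symm
    rw [hsplit, List.map_append]
    have e : List.range' μ (N - μ) = μ :: List.range' (μ+1) (N-μ-1) := by
      obtain ⟨k, hk⟩ : ∃ k, N - μ = k + 1 := ⟨N - μ - 1, by omega⟩
      rw [hk, List.range'_succ]
      congr 2
    rw [e, List.map_cons, hμeq]
  · intro hm
    obtain ⟨i, hi, hieq⟩ := List.mem_map.mp hm
    rw [List.mem_range] at hi
    have := (hP2 i N (by omega) hieq).1
    omega

lemma pvFoldl_append_toList : ∀ (l : List String) (s : String),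
    (l.foldl (· ++ ·) s).toList = s.toList ++ l.flatMap String.toList := by
  intro l
  induction l with
  | nil => simp
  | cons x t ih =>
    intro s
    simp only [List.foldl_cons, List.flatMap_cons, ih, String.toList_append, List.append_assoc]

lemma pvFlatMap_bits (b a : Int) (hb : b ≠ 0) : ∀ l : List Nat,
    (l.map (pvBitStr b a)).flatMap String.toList = l.map (pvCs b a) := by
  intro l
  induction l with
  | nil => simp
  | cons x t ih =>
    simp only [List.map_cons, List.flatMap_cons, ih, pvBitStr_toList b a hb]
    rfl

-- Floyd phase 1
lemma pvMeet_run (b a : Int) (hb : b ≠ 0) (N μ M : Nat) (hμN : μ < N)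
    (hP2 : ∀ i j : Nat, i < j → pvSeq b a i = pvSeq b a j → μ ≤ i ∧ (N - μ) ∣ (j - i))
    (hP3 : ∀ i j : Nat, μ ≤ i → i ≤ j → (N - μ) ∣ (j - i) → pvSeq b a i = pvSeq b a j)
    (hM1 : 1 ≤ M) (hMμ : μ ≤ M) (hMdvd : (N - μ) ∣ M)
    (hMmin : ∀ i, 1 ≤ i → μ ≤ i → (N - μ) ∣ i → M ≤ i) :
    ∀ fuel c, 1 + c ≤ M → M - (1 + c) < fuel →
      pvMeet b fuel (pvSeq b a (1 + c)) (pvSeq b a (2 * (1 + c))) = pvSeq b a (2 * M) := by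
  intro fuel
  induction fuel with
  | zero => intro c _ h; omega
  | succ f ih =>
    intro c hcM hfuel
    by_cases hc : 1 + c = M
    · have heq : pvSeq b a (1 + c) = pvSeq b a (2 * (1 + c)) := by
        apply hP3 _ _ (by omega) (by omega)
        have : 2 * (1 + c) - (1 + c) = 1 + c := by omega
        rw [this, hc]
        exact hMdvd
      simp only [pvMeet, if_pos heq]
      rw [hc]
    · have hlt : 1 + c < M := by omega
      have hne : pvSeq b a (1 + c) ≠ pvSeq b a (2 * (1 + c)) := by
        intro h
        have h2 := hP2 (1 + c) (2 * (1 + c)) (by omega) h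
        have : 2 * (1 + c) - (1 + c) = 1 + c := by omega
        rw [this] at h2
        have := hMmin (1 + c) (by omega) h2.1 h2.2
        omega
      simp only [pvMeet, if_neg hne]
      have e1 : PySem.Int.mod (2 * pvSeq b a (1 + c)) b = pvSeq b a (1 + (c + 1)) := by
        rw [show 1 + (c + 1) = (1 + c) + 1 from by omega, pvSeq_succ]
      have e2 : PySem.Int.mod (4 * pvSeq b a (2 * (1 + c))) b = pvSeq b a (2 * (1 + (c + 1))) := by
        rw [show 2 * (1 + (c + 1)) = 2 * (1 + c) + 2 from by omega]
        exact pvSeq_two_succ b a hb (2 * (1 + c))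
      rw [e1, e2]
      exact ih (c + 1) (by omega) (by omega)

-- Floyd phase 2
lemma pvStart_run (b a : Int) (N μ M : Nat) (hμN : μ < N) (hM1 : 1 ≤ M)
    (hP2 : ∀ i j : Nat, i < j → pvSeq b a i = pvSeq b a j → μ ≤ i ∧ (N - μ) ∣ (j - i))
    (hP3 : ∀ i j : Nat, μ ≤ i → i ≤ j → (N - μ) ∣ (j - i) → pvSeq b a i = pvSeq b a j)
    (hMdvd : (N - μ) ∣ M) :
    ∀ fuel c, c ≤ μ → μ - c < fuel →
      pvStart b fuel (pvSeq b a c) (pvSeq b a (2 * M + c)) = pvSeq b a μ := by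
  intro fuel
  induction fuel with
  | zero => intro c _ h; omega
  | succ f ih =>
    intro c hcμ hfuel
    by_cases hc : c = μ
    · have heq : pvSeq b a c = pvSeq b a (2 * M + c) := by
        apply hP3 _ _ (by omega) (by omega)
        have e : 2 * M + c - c = 2 * M := by omega
        rw [e]
        exact Dvd.dvd.mul_left hMdvd 2
      simp only [pvStart, if_pos heq]
      rw [hc]
    · have hlt : c < μ := by omega
      have hne : pvSeq b a c ≠ pvSeq b a (2 * M + c) := by
        intro h
        have := (hP2 c (2 * M + c) (by omega) h).1
        omega
      simp only [pvStart, if_neg hne]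
      have e1 : PySem.Int.mod (2 * pvSeq b a c) b = pvSeq b a (c + 1) := (pvSeq_succ b a c).symm
      have e2 : PySem.Int.mod (2 * pvSeq b a (2 * M + c)) b = pvSeq b a (2 * M + (c + 1)) := by
        rw [show 2 * M + (c + 1) = (2 * M + c) + 1 from by omega, pvSeq_succ]
      rw [e1, e2]
      exact ih (c + 1) (by omega) (by omega)

-- Floyd phase 3
lemma pvLam_run (b a : Int) (N μ : Nat) (hμN : μ < N)
    (hP2 : ∀ i j : Nat, i < j → pvSeq b a i = pvSeq b a j → μ ≤ i ∧ (N - μ) ∣ (j - i))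
    (hP3 : ∀ i j : Nat, μ ≤ i → i ≤ j → (N - μ) ∣ (j - i) → pvSeq b a i = pvSeq b a j) :
    ∀ fuel c, 1 + c ≤ N - μ → (N - μ) - (1 + c) < fuel →
      pvLam b fuel (pvSeq b a μ) (pvSeq b a (μ + (1 + c))) (1 + (c : Int)) = ((N - μ : Nat) : Int) := by
  intro fuel
  induction fuel with
  | zero => intro c _ h; omega
  | succ f ih =>
    intro c hc hfuel
    by_cases hceq : 1 + c = N - μ
    · have heq : pvSeq b a (μ + (1 + c)) = pvSeq b a μ := by
        symm
        apply hP3 _ _ le_rfl (by omega)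
        have e : μ + (1 + c) - μ = 1 + c := by omega
        rw [e, hceq]
      simp only [pvLam, if_pos heq]
      rw [← hceq]
      push_cast
      ring
    · have hlt : 1 + c < N - μ := by omega
      have hne : pvSeq b a (μ + (1 + c)) ≠ pvSeq b a μ := by
        intro h
        have h2 := hP2 μ (μ + (1 + c)) (by omega) h.symm
        obtain ⟨m, hm⟩ := h2.2
        have e : μ + (1 + c) - μ = 1 + c := by omega
        rw [e] at hm
        rcases Nat.eq_zero_or_pos m with h0 | h0
        · rw [h0, Nat.mul_zero] at hm
          omega
        · have : N - μ ≤ 1 + c := by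
            calc N - μ = (N - μ) * 1 := by omega
              _ ≤ (N - μ) * m := Nat.mul_le_mul_left _ h0
              _ = 1 + c := hm.symm
          omega
      simp only [pvLam, if_neg hne]
      have e1 : PySem.Int.mod (2 * pvSeq b a (μ + (1 + c))) b = pvSeq b a (μ + (1 + (c + 1))) := by
        rw [show μ + (1 + (c + 1)) = (μ + (1 + c)) + 1 from by omega, pvSeq_succ]
      rw [e1]
      have e2 : (1 : Int) + (c : Int) + 1 = 1 + ((c : Nat) + 1 : Nat) := by push_cast; ring
      rw [e2]
      exact ih (c + 1) (by omega) (by omega)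

lemma pvDigits_map (b a : Int) : ∀ n j,
    pvDigits b (n) (pvSeq b a j) = (List.range' j n).map (pvBitStr b a) := by
  intro n
  induction n with
  | zero => intro j; simp [pvDigits]
  | succ m ih =>
    intro j
    simp only [pvDigits, List.range'_succ, List.map_cons]
    rw [← pvSeq_succ, ih (j + 1)]
    rfl


lemma pvJoinChars_nil : ∀ (l : List (List Char)), PySem.Chars.join [] l = l.flatten := by
  intro l
  induction l with
  | nil => rfl
  | cons x t ih =>
    cases t with
    | nil => simp [PySem.Chars.join_singleton]
    | cons y u =>
      rw [PySem.Chars.join_cons_cons, ih]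
      simp

lemma pvJoin_toList (l : List String) :
    (PySem.Str.join "" l).toList = (l.map String.toList).flatten := by
  rw [PySem.Str.toList_join, show ("".toList) = ([]:List Char) from rfl, pvJoinChars_nil]

lemma pvFlatten_bits (b a : Int) (hb : b ≠ 0) (l : List Nat) :
    ((l.map (pvBitStr b a)).map String.toList).flatten = l.map (pvCs b a) := by
  induction l with
  | nil => simp
  | cons x t ih =>
    simp only [List.map_cons, List.flatten_cons, ih, pvBitStr_toList b a hb]
    rfl

-- ===== VERDICT (by name: the statement is the Claim_ definition above) =====
theorem okres_binarny_spec : Claim_equal_okres_binarny := by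
  intro a b _ hpre
  have hb : b ≠ 0 := hpre
  unfold Spec_okres_binarny
  by_cases htmp : pvStrip (b.natAbs + 2) b = 1
  · simp [okres_binarny, okres_binarny_alt, htmp]
  · obtain ⟨N, μ, hμN, hNd, hP2, hP3⟩ := pvCore b a hb
    have hμeq : pvSeq b a μ = pvSeq b a N := hP3 μ N le_rfl (by omega) ⟨1, by omega⟩
    -- the meeting index M of Floyd's phase 1
    have hlam : 0 < N - μ := by omega
    have hdm := Nat.div_add_mod μ (N - μ)
    have hmod := Nat.mod_lt μ hlam
    have hMex : ∃ i, 1 ≤ i ∧ μ ≤ i ∧ (N - μ) ∣ i :=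
      ⟨(N - μ) * (μ / (N - μ)) + (N - μ), by omega, by omega, ⟨μ / (N - μ) + 1, by ring⟩⟩
    classical
    obtain ⟨hM1, hMμ, hMdvd⟩ := Nat.find_spec hMex
    set M := Nat.find hMex with hMdef
    have hMmin : ∀ i, 1 ≤ i → μ ≤ i → (N - μ) ∣ i → M ≤ i :=
      fun i h1 h2 h3 => Nat.find_min' hMex ⟨h1, h2, h3⟩
    have hMN : M ≤ N := by
      have hw : M ≤ (N - μ) * (μ / (N - μ)) + (N - μ) :=
        Nat.find_min' hMex ⟨by omega, by omega, ⟨μ / (N - μ) + 1, by ring⟩⟩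
      have : (μ / (N - μ)) * (N - μ) ≤ μ := Nat.div_mul_le_self μ (N - μ)
      have e : (N - μ) * (μ / (N - μ)) = (μ / (N - μ)) * (N - μ) := by ring
      omega
    -- run A's loop
    have e0 : PySem.Int.mod a b = pvSeq b a 0 := rfl
    have hA := pvLoopA_run b a N μ hμN hP2 hP3 (b.natAbs + 1) 0 (by omega) (by omega) ""
    rw [show ((List.range 0).map (pvSeq b a)) = ([] : List Int) from rfl] at hA
    -- run Floyd
    have hmeet := pvMeet_run b a hb N μ M hμN hP2 hP3 hM1 hMμ hMdvd hMmin (b.natAbs + 1) 0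
      (by omega) (by omega)
    norm_num at hmeet
    have hstart := pvStart_run b a N μ M hμN hM1 hP2 hP3 hMdvd (b.natAbs + 1) 0
      (by omega) (by omega)
    norm_num at hstart
    have hlamrun := pvLam_run b a N μ hμN hP2 hP3 (b.natAbs + 1) 0 (by omega) (by omega)
    norm_num at hlamrun
    -- evaluate both sides
    simp only [okres_binarny, okres_binarny_alt, if_neg htmp]
    rw [e0, hA]
    rw [show PySem.Int.mod (2 * pvSeq b a 0) b = pvSeq b a 1 from (pvSeq_succ b a 0).symm,
        show PySem.Int.mod (4 * pvSeq b a 0) b = pvSeq b a 2 from pvSeq_two_succ b a hb 0,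
        hmeet, hstart]
    rw [show PySem.Int.mod (2 * pvSeq b a μ) b = pvSeq b a (μ + 1) from (pvSeq_succ b a μ).symm]
    rw [show (1 : Int) = 1 + ((0 : Nat) : Int) from by norm_num] at hlamrun ⊢
    rw [show pvSeq b a (μ + 1) = pvSeq b a (μ + (1 + 0)) from rfl, hlamrun]
    rw [pvIndex_eq b a N μ hμN hP2 hμeq]
    simp only [Option.getD_some]
    rw [Prod.mk.injEq]
    refine ⟨?_, ?_⟩
    · simp [PySem.List.len_eq]
      push_cast
      omega
    · apply String.toList_inj.mp
      rw [Int.toNat_natCast, pvDigits_map b a (N - μ) μ, pvJoin_toList, pvFlatten_bits b a hb]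
      rw [PySem.Str.toList_slice]
      simp only [PySem.Chars.slice_eq_listSlice]
      rw [PySem.List.slice_from_natCast]
      rw [pvFoldl_append_toList, pvFlatMap_bits b a hb]
      rw [show ("".toList) = ([] : List Char) from rfl, List.nil_append, Nat.sub_zero]
      have hsplit : List.range' 0 N = List.range' 0 μ ++ List.range' μ (N - μ) := by
        have e := List.range'_append (s := 0) (m := μ) (n := N - μ) (step := 1)
        norm_num at e
        rw [show μ + (N - μ) = N from by omega] at e
        exact e.symm
      rw [hsplit, List.map_append]
      exact List.drop_left' (by simp)
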